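-- pv_equiv track=rewrite | github.com/pssachdeva/measuring_hate_speech_llms | src/mhs_llms/labels.py | _combine_numeric_version_tokens
-- ===== SOURCE A (Python) =====
-- def _combine_numeric_version_tokens(tokens: list[str]) -> list[str]:
--     """Merge adjacent numeric version tokens into dotted version strings."""
--
--     combined_tokens: list[str] = []
--     current_index = 0
--     while current_index < len(tokens):
--         current_token = tokens[current_index]
--         if _is_numeric_version_token(current_token):
--             version_tokens = [current_token]
--             look_ahead_index = current_index + 1
--             while look_ahead_index < len(tokens) and tokens[look_ahead_index].isdigit():
--                 version_tokens.append(tokens[look_ahead_index])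
--                 look_ahead_index += 1
--             combined_tokens.append(".".join(version_tokens))
--             current_index = look_ahead_index
--             continue
--
--         combined_tokens.append(current_token)
--         current_index += 1
--     return combined_tokens
--
-- def _is_numeric_version_token(token: str) -> bool:
--     """Return whether a token looks like one model version component."""
--
--     return any(character.isdigit() for character in token)
-- ===== SOURCE B (Python) =====
-- def _combine_numeric_version_tokens(tokens: list[str]) -> list[str]:
--     """Merge adjacent numeric version tokens into dotted version strings."""
--     combined: list[str] = []
--     group = None  # pending version run, or None
--     for token in tokens:
--         if group is not None and token.isdigit():
--             group.append(token)
--             continue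
--         if group is not None:
--             combined.append(".".join(group))
--             group = None
--         if any(c.isdigit() for c in token):
--             group = [token]
--         else:
--             combined.append(token)
--     if group is not None:
--         combined.append(".".join(group))
--     return combined
-- ===== Notes on version B (the rewrite author's own statement) =====
-- stated objective: simpler
-- what changed: Replaced the index-driven while loop with an inner look-ahead while by a single for-loop carrying a pending group buffer that is flushed when a run ends (and once after the loop).
import Mathlib
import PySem

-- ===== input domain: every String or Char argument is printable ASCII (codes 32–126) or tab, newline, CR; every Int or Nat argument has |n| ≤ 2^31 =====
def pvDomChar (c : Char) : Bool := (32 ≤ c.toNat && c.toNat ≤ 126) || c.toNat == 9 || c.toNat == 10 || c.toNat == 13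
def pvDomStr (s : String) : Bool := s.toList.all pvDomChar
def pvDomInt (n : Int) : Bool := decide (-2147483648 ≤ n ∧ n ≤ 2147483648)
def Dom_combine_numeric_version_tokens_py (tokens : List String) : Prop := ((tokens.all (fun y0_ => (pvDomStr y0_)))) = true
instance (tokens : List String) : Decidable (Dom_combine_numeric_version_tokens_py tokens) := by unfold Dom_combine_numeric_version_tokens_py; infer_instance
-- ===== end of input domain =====

-- B replaces A's index-driven outer while with an inner look-ahead while by a single
-- pass carrying a pending group buffer that is flushed when a run ends (objective: simpler).

-- ===== PORT A =====
-- _is_numeric_version_token: any(character.isdigit() for character in token)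
def pvIsNumeric (token : String) : Bool := token.toList.any PySem.Chars.isdigit

-- A's inner while loop: collect the leading run of isdigit() tokens, return (run, rest)
def pvSpan : List String → List String × List String
  | [] => ([], [])
  | t :: r =>
    if PySem.Str.strIsdigit t then
      let p := pvSpan r
      (t :: p.1, p.2)
    else ([], t :: r)

theorem pvSpan_len : ∀ l : List String, (pvSpan l).2.length ≤ l.length := by
  intro l
  induction l with
  | nil => simp [pvSpan]
  | cons t r ih =>
    simp only [pvSpan]
    split
    · exact Nat.le_succ_of_le ih
    · simp

-- A's outer while loop over current_index, as structural recursion on the remaining tokens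
def combine_numeric_version_tokens_py : List String → List String
  | [] => []
  | t :: rest =>
    if pvIsNumeric t then
      let p := pvSpan rest
      PySem.Str.join "." (t :: p.1) :: combine_numeric_version_tokens_py p.2
    else t :: combine_numeric_version_tokens_py rest
termination_by l => l.length
decreasing_by
  · exact Nat.lt_succ_of_le (pvSpan_len rest)
  · simp

-- ===== PORT B =====
-- B's loop body: state = (combined so far, pending group or none)
def pvStep (s : List String × Option (List String)) (t : String) :
    List String × Option (List String) :=
  match s with
  | (acc, some g) =>
    if PySem.Str.strIsdigit t then (acc, some (g ++ [t]))
    else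
      let acc' := acc ++ [PySem.Str.join "." g]
      if pvIsNumeric t then (acc', some [t]) else (acc' ++ [t], none)
  | (acc, none) =>
    if pvIsNumeric t then (acc, some [t]) else (acc ++ [t], none)

-- B's final flush after the loop
def pvFinish (s : List String × Option (List String)) : List String :=
  match s.2 with
  | some g => s.1 ++ [PySem.Str.join "." g]
  | none => s.1

def combine_numeric_version_tokens_py_alt (tokens : List String) : List String :=
  pvFinish (tokens.foldl pvStep ([], none))

-- ===== PRECONDITION & SPEC =====
def Spec_combine_numeric_version_tokens_py (tokens : List String) (out : List String) : Prop := out = combine_numeric_version_tokens_py_alt tokens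
instance (tokens : List String) (out : List String) : Decidable (Spec_combine_numeric_version_tokens_py tokens out) := by unfold Spec_combine_numeric_version_tokens_py; infer_instance

-- ===== CLAIM (what is proved, stated in full; the proofs are below) =====
def Claim_equal_combine_numeric_version_tokens_py : Prop := ∀ (tokens : List String), Dom_combine_numeric_version_tokens_py tokens → Spec_combine_numeric_version_tokens_py tokens (combine_numeric_version_tokens_py tokens)

-- ===== LEMMAS AND PROOFS =====

theorem pvKey : ∀ ts : List String,
    (∀ acc g, pvFinish (ts.foldl pvStep (acc, some g)) =
      acc ++ PySem.Str.join "." (g ++ (pvSpan ts).1) ::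
        combine_numeric_version_tokens_py (pvSpan ts).2) ∧
    (∀ acc, pvFinish (ts.foldl pvStep (acc, none)) =
      acc ++ combine_numeric_version_tokens_py ts) := by
  intro ts
  induction ts with
  | nil =>
    constructor
    · intro acc g; simp [pvFinish, pvSpan, combine_numeric_version_tokens_py]
    · intro acc; simp [pvFinish, combine_numeric_version_tokens_py]
  | cons t r ih =>
    constructor
    · intro acc g
      by_cases hd : PySem.Chars.strIsdigit t.toList = true
      · have h1 : pvStep (acc, some g) t = (acc, some (g ++ [t])) := by
          simp [pvStep, hd]
        rw [List.foldl_cons, h1, ih.1]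
        simp [pvSpan, hd]
      · by_cases hn : pvIsNumeric t = true
        · have h1 : pvStep (acc, some g) t =
              (acc ++ [PySem.Str.join "." g], some [t]) := by
            simp [pvStep, hd, hn]
          have hA : combine_numeric_version_tokens_py (t :: r) =
              PySem.Str.join "." (t :: (pvSpan r).1) ::
                combine_numeric_version_tokens_py (pvSpan r).2 := by
            rw [combine_numeric_version_tokens_py]; simp [hn]
          rw [List.foldl_cons, h1, ih.1]
          simp [pvSpan, hd, hA]
        · have h1 : pvStep (acc, some g) t =
              (acc ++ [PySem.Str.join "." g] ++ [t], none) := by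
            simp [pvStep, hd, hn]
          have hA : combine_numeric_version_tokens_py (t :: r) =
              t :: combine_numeric_version_tokens_py r := by
            rw [combine_numeric_version_tokens_py]; simp [hn]
          rw [List.foldl_cons, h1, ih.2]
          simp [pvSpan, hd, hA]
    · intro acc
      by_cases hn : pvIsNumeric t = true
      · have h1 : pvStep (acc, none) t = (acc, some [t]) := by
          simp [pvStep, hn]
        have hA : combine_numeric_version_tokens_py (t :: r) =
            PySem.Str.join "." (t :: (pvSpan r).1) ::
              combine_numeric_version_tokens_py (pvSpan r).2 := by
          rw [combine_numeric_version_tokens_py]; simp [hn]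
        rw [List.foldl_cons, h1, ih.1]
        simp [hA]
      · have h1 : pvStep (acc, none) t = (acc ++ [t], none) := by
          simp [pvStep, hn]
        have hA : combine_numeric_version_tokens_py (t :: r) =
            t :: combine_numeric_version_tokens_py r := by
          rw [combine_numeric_version_tokens_py]; simp [hn]
        rw [List.foldl_cons, h1, ih.2]
        simp [hA]

-- ===== VERDICT (by name: the statement is the Claim_ definition above) =====
theorem combine_numeric_version_tokens_py_spec : Claim_equal_combine_numeric_version_tokens_py := by
  intro tokens _
  unfold Spec_combine_numeric_version_tokens_py combine_numeric_version_tokens_py_alt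
  rw [(pvKey tokens).2 []]
  simp
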